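-- pv_equiv track=rewrite | github.com/etorresh/MarkovTweets | string_control.py | clean_periods
-- ===== SOURCE A (Python) =====
-- def clean_periods(string_input):
--     base = 0
--     clean_list = []
--     for x in string_input:
--         # Prevents index out of range.
--         if base == len(string_input) - 1:
--             clean_list.append(string_input[base])
--             break
--         if string_input[base] == " " and string_input[base + 1] == ".":
--             pass
--         else:
--             clean_list.append(string_input[base])
--         base += 1
--     return "".join(clean_list)
-- ===== SOURCE B (Python) =====
-- def clean_periods(string_input):
--     return string_input.replace(" .", ".")
-- ===== Notes on version B (the rewrite author's own statement) =====
-- stated objective: idiomatic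
-- what changed: Replaces the manual index-tracking character loop with list accumulator and lookahead test by a single non-overlapping str.replace(" .", ".") call (C-level scan instead of per-character Python bytecode).
import Mathlib
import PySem

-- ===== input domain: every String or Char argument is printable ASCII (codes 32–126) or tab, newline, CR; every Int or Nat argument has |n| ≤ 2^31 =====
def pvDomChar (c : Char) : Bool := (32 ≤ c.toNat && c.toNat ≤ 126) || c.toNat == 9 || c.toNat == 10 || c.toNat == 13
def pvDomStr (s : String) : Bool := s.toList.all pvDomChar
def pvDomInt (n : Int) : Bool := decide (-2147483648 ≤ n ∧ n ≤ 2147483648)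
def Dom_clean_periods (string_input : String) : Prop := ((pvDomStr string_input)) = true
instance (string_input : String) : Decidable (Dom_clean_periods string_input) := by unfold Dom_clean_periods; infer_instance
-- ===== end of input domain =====

-- B replaces A's manual index-tracking loop with a single non-overlapping str.replace(" .", ".") call (idiomatic).


-- ===== PORT A =====
-- for-loop with index 'base', break at the last character, 'clean_list' accumulator
def cleanLoopA (s : List Char) : List Char → Nat → List Char → List Char
  | [], _, acc => acc
  | _ :: rest, base, acc =>
    if base = s.length - 1 then acc ++ [PySem.List.pyGetD s (base : Int) ' ']
    else if PySem.List.pyGetD s (base : Int) ' ' = ' ' ∧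
            PySem.List.pyGetD s ((base : Int) + 1) ' ' = '.' then
      cleanLoopA s rest (base + 1) acc
    else cleanLoopA s rest (base + 1) (acc ++ [PySem.List.pyGetD s (base : Int) ' '])

def clean_periods (string_input : String) : String :=
  String.ofList (cleanLoopA string_input.toList string_input.toList 0 [])

-- ===== PORT B =====
def clean_periods_alt (string_input : String) : String :=
  PySem.Str.replace string_input " ." "."

-- ===== PRECONDITION & SPEC =====
def Spec_clean_periods (string_input : String) (out : String) : Prop := out = clean_periods_alt string_input
instance (string_input : String) (out : String) : Decidable (Spec_clean_periods string_input out) := by unfold Spec_clean_periods; infer_instance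

-- ===== CLAIM (what is proved, stated in full; the proofs are below) =====
def Claim_equal_clean_periods : Prop := ∀ (string_input : String), Dom_clean_periods string_input → Spec_clean_periods string_input (clean_periods string_input)

-- ===== LEMMAS AND PROOFS =====

-- common characterisation: drop each ' ' immediately followed by '.'
def pairClean : List Char → List Char
  | [] => []
  | [c] => [c]
  | c1 :: c2 :: t =>
    if c1 = ' ' ∧ c2 = '.' then pairClean (c2 :: t) else c1 :: pairClean (c2 :: t)

lemma pairClean_cons_ne (c : Char) (t : List Char) (h : ¬ (c = ' ' ∧ t.head? = some '.')) :
    pairClean (c :: t) = c :: pairClean t := by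
  cases t with
  | nil => rfl
  | cons y t' =>
    simp only [pairClean, List.head?] at *
    rw [if_neg (by simpa using h)]

lemma cleanLoopA_eq (s : List Char) :
    ∀ rest base acc, rest = s.drop base → cleanLoopA s rest base acc = acc ++ pairClean rest := by
  intro rest
  induction rest with
  | nil => intro base acc _; simp [cleanLoopA, pairClean]
  | cons x r ih =>
    intro base acc h
    have hlt : base < s.length := by
      by_contra hb
      have hnil : s.drop base = [] := List.drop_eq_nil_of_le (Nat.le_of_not_lt hb)
      rw [← h] at hnil; exact List.cons_ne_nil x r hnil
    have hlen : s.length = base + 1 + r.length := by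
      have hl := congrArg List.length h
      simp [List.length_drop] at hl
      omega
    have hx : s[base]? = some x := by
      have h0 : (List.drop base s)[0]? = s[base + 0]? := List.getElem?_drop
      rw [← h] at h0
      simpa using h0.symm
    have hgx : PySem.List.pyGetD s (base : Int) ' ' = x := by
      simp [PySem.List.pyGetD_natCast, List.getD, hx]
    have hr : r = s.drop (base + 1) := by
      have ht := congrArg List.tail h
      simpa [List.tail_drop] using ht
    cases r with
    | nil =>
      have hb : base = s.length - 1 := by simp at hlen; omega
      simp [cleanLoopA, hb, pairClean]
      simpa [hb] using hgx
    | cons y r' =>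
      have hy : s[base + 1]? = some y := by
        have h0 : (List.drop (base + 1) s)[0]? = s[(base + 1) + 0]? := List.getElem?_drop
        rw [← hr] at h0
        simpa using h0.symm
      have hgy : PySem.List.pyGetD s ((base : Int) + 1) ' ' = y := by
        have e : ((base : Int) + 1) = ((base + 1 : Nat) : Int) := by push_cast; ring
        rw [e, PySem.List.pyGetD_natCast]
        simp [List.getD, hy]
      have hb : ¬ base = s.length - 1 := by simp at hlen ⊢; omega
      by_cases hc : x = ' ' ∧ y = '.'
      · have hstep : cleanLoopA s (x :: y :: r') base acc = cleanLoopA s (y :: r') (base + 1) acc := by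
          simp [cleanLoopA, hb, hgx, hgy, hc.1, hc.2]
        rw [hstep, ih (base + 1) acc hr]
        simp [pairClean, hc.1, hc.2]
      · have hstep : cleanLoopA s (x :: y :: r') base acc
            = cleanLoopA s (y :: r') (base + 1) (acc ++ [x]) := by
          simp only [cleanLoopA, if_neg hb, hgx, hgy]
          rw [if_neg hc]
        rw [hstep, ih (base + 1) (acc ++ [x]) hr]
        simp [pairClean, if_neg hc]

lemma replaceGo_eq :
    ∀ (fuel : Nat) (l acc : List Char), l.length ≤ fuel →
      PySem.Chars.replace.go [' ', '.'] ['.'] fuel l acc = acc.reverse ++ pairClean l := by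
  intro fuel
  induction fuel with
  | zero =>
    intro l acc h
    have : l = [] := by
      cases l with
      | nil => rfl
      | cons a t => simp at h
    subst this
    simp [PySem.Chars.replace.go, pairClean]
  | succ f ih =>
    intro l acc h
    cases l with
    | nil => simp [PySem.Chars.replace.go, pairClean]
    | cons c t =>
      by_cases hp : [' ', '.'].isPrefixOf (c :: t) = true
      · obtain ⟨hc, t', ht⟩ : c = ' ' ∧ ∃ t', t = '.' :: t' := by
          cases t with
          | nil => simp [List.isPrefixOf] at hp
          | cons y t' =>
            simp [List.isPrefixOf] at hp
            exact ⟨hp.1.symm, t', by rw [← hp.2]⟩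
        subst hc; subst ht
        have step : PySem.Chars.replace.go [' ', '.'] ['.'] (f + 1) (' ' :: '.' :: t') acc
            = PySem.Chars.replace.go [' ', '.'] ['.'] f t' ('.' :: acc) := by
          simp [PySem.Chars.replace.go, hp]
        rw [step, ih t' ('.' :: acc) (by simp at h; omega)]
        have h1 : pairClean (' ' :: '.' :: t') = pairClean ('.' :: t') := by
          simp [pairClean]
        have h2 : pairClean ('.' :: t') = '.' :: pairClean t' :=
          pairClean_cons_ne _ _ (by rintro ⟨h', _⟩; exact absurd h' (by decide))
        rw [h1, h2]; simp
      · have step : PySem.Chars.replace.go [' ', '.'] ['.'] (f + 1) (c :: t) acc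
            = PySem.Chars.replace.go [' ', '.'] ['.'] f t (c :: acc) := by
          simp [PySem.Chars.replace.go, hp]
        rw [step, ih t (c :: acc) (by simp at h; omega)]
        have h2 : pairClean (c :: t) = c :: pairClean t := by
          apply pairClean_cons_ne
          rintro ⟨hc, hh⟩
          apply hp
          cases t with
          | nil => simp at hh
          | cons y t' =>
            simp at hh
            simp [List.isPrefixOf, hc, hh]
        rw [h2]; simp
  
lemma replace_eq_pairClean (cs : List Char) :
    PySem.Chars.replace cs [' ', '.'] ['.'] = pairClean cs := by
  have : PySem.Chars.replace cs [' ', '.'] ['.']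
      = PySem.Chars.replace.go [' ', '.'] ['.'] cs.length cs [] := by
    simp [PySem.Chars.replace]
  rw [this, replaceGo_eq cs.length cs [] (le_refl _)]
  simp

-- ===== VERDICT (by name: the statement is the Claim_ definition above) =====
theorem clean_periods_spec : Claim_equal_clean_periods := by
  intro s _
  unfold Spec_clean_periods clean_periods clean_periods_alt
  have hB : PySem.Str.replace s " ." "." = String.ofList (pairClean s.toList) := by
    rw [show PySem.Str.replace s " ." "."
        = String.ofList (PySem.Chars.replace s.toList (" .").toList (".").toList) from rfl]
    rw [show (" ." : String).toList = [' ', '.'] from rfl,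
        show ("." : String).toList = ['.'] from rfl, replace_eq_pairClean]
  rw [hB]
  congr 1
  simpa using cleanLoopA_eq s.toList s.toList 0 [] (by simp)
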